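-- pv_equiv track=rewrite | github.com/woodun/RSA_CUDA | timing_test/proto_exp.py | CheckDivExp
-- ===== SOURCE A (Python) =====
-- def bits(i):
-- 	return "{0:b}".format(i)
--
-- def egcd(a, b):
--     if a == 0:
--         return (b, 0, 1)
--     else:
--         g, y, x = egcd(b % a, a)
--         return (g, x - (b // a) * y, y)
--
-- def modinv(a, m):
--     g, x, y = egcd(a, m)
--     if g != 1:
--         raise Exception('modular inverse does not exist')
--     else:
--         return x % m
--
-- def findR(i):
-- 	i_b = "{0:b}".format(i)
-- 	return len(i_b), 2**len(i_b) #changes: more efficient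
--
-- def REDC(R,N,N_,T,L): #changes: more efficient
-- 	m = ((T & R) * N_) & R #changes: more efficient
-- 	t = (T + m*N) >> L #changes: python 3 compatible
-- 	if t >= N:
-- 		t = t - N
-- 		return t
-- 	else:
-- 		N = t - N
-- 		return t
--
-- def CheckREDC(R,N,N_,T,L): #changes: more efficient
-- 	m = ((T & R) * N_) & R #changes: more efficient
-- 	t = (T + m*N) >> L #changes: python 3 compatible
-- 	if t >= N:
-- 		return 1
-- 	else:
-- 		return 0
--
-- def CheckDivExp(mes,e,n,bit):
-- 	r = findR(n)[1] #changes: more efficient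
-- 	rmod = r - 1  #changes: more efficient
-- 	l = findR(n)[0] #changes: more efficient
-- 	n_ = - modinv(n,r) & rmod #changes: more efficient
-- 	r2 = (r << l) % n #changes: more efficient
-- 	_x1 = REDC(rmod,n,n_,mes*r2,l) #changes: more efficient
-- 	_x2 = _x1 * _x1
-- 	_x2 = REDC(rmod,n,n_,_x2,l)
-- 	e_b = bits(e)
-- 	if bit > len(e_b) - 2 :
-- 		print ("Wrong bit!")
-- 		exit(1)
-- 	c = len(e_b) - 2
-- 	for i in e_b[1:]:
-- 		if bit == c:
-- 			#print "Got ya! [%d]=%s" % (c, i)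
-- 			_x1_temp = _x1
-- 			_x2_temp = _x2
--
-- 			#simulate exp bit 0
-- 			_x2 = _x1 * _x2
-- 			d1_1 = CheckREDC(rmod,n,n_,_x2,l) #changes: more efficient
-- 			_x1 = _x1 * _x1
-- 			d1_2 = CheckREDC(rmod,n,n_,_x1,l) #changes: more efficient
--
-- 			#simulate exp bit 1
-- 			_x1 = _x1_temp
-- 			_x2 = _x2_temp
-- 			_x1 = _x1 * _x2
-- 			d0_1 = CheckREDC(rmod,n,n_,_x1,l) #changes: more efficient
-- 			_x2 = _x2 * _x2
-- 			d0_2 = CheckREDC(rmod,n,n_,_x2,l) #changes: more efficient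
-- 			return ((d0_1, d0_2), (d1_1, d1_2))
-- 		else:
-- 			#print "[%d]=%s cont ..." % (c, i)
-- 			if i == '0':
-- 				_x2 = _x1 * _x2
-- 				_x2 = REDC(rmod,n,n_,_x2,l) #changes: more efficient
-- 				_x1 = _x1 * _x1
-- 				_x1 = REDC(rmod,n,n_,_x1,l) #changes: more efficient
-- 			else:
-- 				_x1 = _x1 * _x2
-- 				_x1 = REDC(rmod,n,n_,_x1,l) #changes: more efficient
-- 				_x2 = _x2 * _x2
-- 				_x2 = REDC(rmod,n,n_,_x2,l) #changes: more efficient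
-- 			c -= 1
-- ===== SOURCE B (Python) =====
-- def egcd(a, b):
--     if a == 0:
--         return (b, 0, 1)
--     else:
--         g, y, x = egcd(b % a, a)
--         return (g, x - (b // a) * y, y)
--
-- def modinv(a, m):
--     g, x, y = egcd(a, m)
--     if g != 1:
--         raise Exception('modular inverse does not exist')
--     else:
--         return x % m
--
-- def monty(t, n, n_, rmask, l):
--     """Montgomery partial reduction of t: the quotient may still be >= n."""
--     return (t + (((t & rmask) * n_) & rmask) * n) >> l
--
-- def reduce(t, n, n_, rmask, l):
--     u = monty(t, n, n_, rmask, l)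
--     return u - n if u >= n else u
--
-- def ladder(p, x1, x2, n, n_, rmask, l):
--     """Square-and-multiply ladder state after consuming, most significant first,
--     the bits of p that lie below its leading one."""
--     if p == 1:
--         return x1, x2
--     x1, x2 = ladder(p >> 1, x1, x2, n, n_, rmask, l)
--     m = reduce(x1 * x2, n, n_, rmask, l)
--     if p & 1:
--         return m, reduce(x2 * x2, n, n_, rmask, l)
--     return reduce(x1 * x1, n, n_, rmask, l), m
--
-- def CheckDivExp(mes, e, n, bit):
--     l = n.bit_length()
--     r = 1 << l
--     n_ = -modinv(n, r) & (r - 1)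
--     x1 = reduce(mes * (r * r % n), n, n_, r - 1, l)
--     x2 = reduce(x1 * x1, n, n_, r - 1, l)
--     if bit > e.bit_length() - 2:
--         print("Wrong bit!")
--         exit(1)
--     x1, x2 = ladder(e >> (bit + 1), x1, x2, n, n_, r - 1, l)
--     p01 = int(monty(x1 * x2, n, n_, r - 1, l) >= n)
--     return ((p01, int(monty(x2 * x2, n, n_, r - 1, l) >= n)),
--             (p01, int(monty(x1 * x1, n, n_, r - 1, l) >= n)))
-- ===== Notes on version B (the rewrite author's own statement) =====
-- stated objective: alternative
-- what changed: B drops the binary-string formatting and character loop entirely: it reads bit lengths with int.bit_length(), advances the ladder by structural recursion on the integer prefix e >> (bit + 1) (top-down, base case the leading bit), and hoists the three final CheckREDC probes out of the loop, sharing the x1*x2 probe that A computes twice; …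
-- outside the precondition, e.g. on CheckDivExp(1, -6, 9, 0): A returns ((0, 0), (0, 0)), B raises RecursionError; on CheckDivExp(5, 6, 9, -1): A returns None, B returns ((0, 0), (0, 0))
import Mathlib
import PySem

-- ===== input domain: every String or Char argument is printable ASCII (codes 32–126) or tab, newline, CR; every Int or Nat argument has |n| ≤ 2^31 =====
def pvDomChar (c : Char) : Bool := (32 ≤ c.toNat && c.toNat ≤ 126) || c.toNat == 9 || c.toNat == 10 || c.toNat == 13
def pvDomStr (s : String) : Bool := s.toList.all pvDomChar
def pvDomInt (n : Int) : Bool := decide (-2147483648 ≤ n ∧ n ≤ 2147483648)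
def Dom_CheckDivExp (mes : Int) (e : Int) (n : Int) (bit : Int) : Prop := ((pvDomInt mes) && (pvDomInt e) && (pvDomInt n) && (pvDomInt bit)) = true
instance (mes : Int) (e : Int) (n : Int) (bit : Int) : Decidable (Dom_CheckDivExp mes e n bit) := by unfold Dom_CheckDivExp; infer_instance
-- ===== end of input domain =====

-- B drops the binary-string formatting and character loop: it reads bit lengths with the
-- bit_length builtin, advances the ladder by structural recursion on the integer prefix
-- e >> (bit + 1), and hoists the three final probes (sharing the x1*x2 one) out of the loop;
-- objective: alternative.

-- ===== PORT A =====
-- termination measure fact for egcd's recursion (cited in decreasing_by)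
lemma pv_mod_natAbs_lt (b a : Int) (h : a ≠ 0) : (PySem.Int.mod b a).natAbs < a.natAbs := by
  rcases lt_or_gt_of_ne h with ha | ha
  · have := PySem.Int.mod_neg_bounds b ha; omega
  · have h1 := PySem.Int.mod_nonneg b ha
    have h2 := PySem.Int.mod_lt b ha; omega

def egcd (a b : Int) : Int × Int × Int :=
  if h : a = 0 then (b, 0, 1)
  else
    let r := egcd (PySem.Int.mod b a) a
    (r.1, r.2.2 - PySem.Int.floordiv b a * r.2.1, r.2.1)
termination_by a.natAbs
decreasing_by exact pv_mod_natAbs_lt b a h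

def modinv (a m : Int) : Int :=
  let r := egcd a m
  if r.1 ≠ 1 then 0 -- Python raises Exception('modular inverse does not exist'); Pre_ excludes
  else PySem.Int.mod r.2.1 m

def findR (i : Int) : Int × Int :=
  let L := (PySem.Int.toBinChars i).length   -- len("{0:b}".format(i))
  ((L : Int), 2 ^ L)

def REDC (R N N_ T L : Int) : Int :=
  let m := PySem.Int.band (PySem.Int.band T R * N_) R
  let t := (T + m * N) >>> L.toNat   -- Python >>; L is a bit length, never negative
  if t ≥ N then t - N else t

def CheckREDC (R N N_ T L : Int) : Int :=
  let m := PySem.Int.band (PySem.Int.band T R * N_) R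
  let t := (T + m * N) >>> L.toNat
  if t ≥ N then 1 else 0

-- A's for-loop over the formatted exponent's characters, counter c, target check inside
def loopA (rmod n n_ l bit : Int) : List Char → Int → Int → Int → (Int × Int) × (Int × Int)
  | [], _, _, _ => ((0, 0), (0, 0))   -- loop falls through: Python returns None; Pre_ excludes
  | i :: rest, c, x1, x2 =>
    if bit = c then
      let x2a := x1 * x2
      let d1_1 := CheckREDC rmod n n_ x2a l
      let x1a := x1 * x1
      let d1_2 := CheckREDC rmod n n_ x1a l
      let x1b := x1 * x2
      let d0_1 := CheckREDC rmod n n_ x1b l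
      let x2b := x2 * x2
      let d0_2 := CheckREDC rmod n n_ x2b l
      ((d0_1, d0_2), (d1_1, d1_2))
    else if i = '0' then
      loopA rmod n n_ l bit rest (c - 1) (REDC rmod n n_ (x1 * x1) l) (REDC rmod n n_ (x1 * x2) l)
    else
      loopA rmod n n_ l bit rest (c - 1) (REDC rmod n n_ (x1 * x2) l) (REDC rmod n n_ (x2 * x2) l)

def CheckDivExp (mes : Int) (e : Int) (n : Int) (bit : Int) : (Int × Int) × (Int × Int) :=
  let r := (findR n).2
  let rmod := r - 1
  let l := (findR n).1
  let n_ := PySem.Int.band (-(modinv n r)) rmod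
  let r2 := PySem.Int.mod (r <<< l.toNat) n
  let x1 := REDC rmod n n_ (mes * r2) l
  let x2 := REDC rmod n n_ (x1 * x1) l
  let e_b := PySem.Int.toBinChars e   -- bits(e)
  if bit > PySem.List.len e_b - 2 then ((0, 0), (0, 0))   -- Python prints "Wrong bit!" and exits; Pre_ excludes
  else loopA rmod n n_ l bit (PySem.List.slice e_b (some 1) none) (PySem.List.len e_b - 2) x1 x2

-- ===== PORT B =====
-- termination measure fact for ladderB's halving recursion (cited in decreasing_by)
lemma pv_shr_one_toNat_lt (m : Int) (h : 0 < m) : (m >>> (1 : Nat)).toNat < m.toNat := by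
  have h2 : m >>> (1 : Nat) = m / 2 := by
    rw [Int.shiftRight_eq_div_pow]; norm_num
  rw [h2]; omega

-- Montgomery partial reduction of t: the quotient may still be >= n
def montyB (t n n_ rmask l : Int) : Int :=
  (t + PySem.Int.band (PySem.Int.band t rmask * n_) rmask * n) >>> l.toNat

def reduceB (t n n_ rmask l : Int) : Int :=
  let u := montyB t n n_ rmask l
  if u ≥ n then u - n else u

-- ladder state after consuming, most significant first, the bits of p below its leading one
def ladderB (n n_ rmask l p x1 x2 : Int) : Int × Int :=
  if h : p ≤ 1 then (x1, x2)   -- Python base case p == 1; for p ≤ 0 Python never returns (Pre_ excludes)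
  else
    let s := ladderB n n_ rmask l (p >>> (1 : Nat)) x1 x2
    let m := reduceB (s.1 * s.2) n n_ rmask l
    if PySem.Int.band p 1 = 1 then (m, reduceB (s.2 * s.2) n n_ rmask l)
    else (reduceB (s.1 * s.1) n n_ rmask l, m)
termination_by p.toNat
decreasing_by exact pv_shr_one_toNat_lt p (by omega)

def CheckDivExp_alt (mes : Int) (e : Int) (n : Int) (bit : Int) : (Int × Int) × (Int × Int) :=
  let l := ((PySem.Int.bitLength n : Int))   -- n.bit_length()
  let r := (1 : Int) <<< l.toNat
  let n_ := PySem.Int.band (-(modinv n r)) (r - 1)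
  let x1 := reduceB (mes * PySem.Int.mod (r * r) n) n n_ (r - 1) l
  let x2 := reduceB (x1 * x1) n n_ (r - 1) l
  if bit > (PySem.Int.bitLength e : Int) - 2 then ((0, 0), (0, 0))   -- Python prints "Wrong bit!" and exits; Pre_ excludes
  else
    let st := ladderB n n_ (r - 1) l (e >>> (bit + 1).toNat) x1 x2   -- e >> (bit + 1); bit ≥ 0 under Pre_
    let p01 := if montyB (st.1 * st.2) n n_ (r - 1) l ≥ n then (1 : Int) else 0
    ((p01, if montyB (st.2 * st.2) n n_ (r - 1) l ≥ n then (1 : Int) else 0),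
     (p01, if montyB (st.1 * st.1) n n_ (r - 1) l ≥ n then (1 : Int) else 0))

-- ===== PRECONDITION & SPEC =====
-- Pre_ = the inputs on which the Python A returns a tuple: n odd and positive (any other n makes
-- modinv raise), 0 ≤ bit ≤ len(bits(e)) - 2 (above that A prints and exits(1); below it A's loop
-- falls through and returns None, outside the declared type), and 1 ≤ e: for e ≤ 0 A's character
-- loop consumes the '-' sign of the formatted exponent as if it were a set bit — an artefact of
-- the string iteration — and B's recursion on the exponent prefix does not return (RecursionError).
def Pre_CheckDivExp (mes : Int) (e : Int) (n : Int) (bit : Int) : Prop :=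
  1 ≤ n ∧ PySem.Int.mod n 2 = 1 ∧ 1 ≤ e ∧
    0 ≤ bit ∧ bit ≤ PySem.List.len (PySem.Int.toBinChars e) - 2
instance (mes : Int) (e : Int) (n : Int) (bit : Int) : Decidable (Pre_CheckDivExp mes e n bit) := by
  unfold Pre_CheckDivExp; infer_instance

def pvWitness_CheckDivExp : Int × Int × Int × Int := (5, 6, 9, 1)

def Spec_CheckDivExp (mes : Int) (e : Int) (n : Int) (bit : Int) (out : (Int × Int) × (Int × Int)) : Prop := out = CheckDivExp_alt mes e n bit
instance (mes : Int) (e : Int) (n : Int) (bit : Int) (out : (Int × Int) × (Int × Int)) : Decidable (Spec_CheckDivExp mes e n bit out) := by unfold Spec_CheckDivExp; infer_instance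

-- ===== CLAIM =====
def Claim_equal_CheckDivExp : Prop := ∀ (mes : Int) (e : Int) (n : Int) (bit : Int), Dom_CheckDivExp mes e n bit → Pre_CheckDivExp mes e n bit → Spec_CheckDivExp mes e n bit (CheckDivExp mes e n bit)

-- ===== LEMMAS AND PROOFS =====
-- bits of m, least significant first (proof-only model of both programs' bit streams)
def bitsRevB (m : Int) : List Int :=
  if h : 0 < m then PySem.Int.band m 1 :: bitsRevB (m >>> (1 : Nat)) else []
termination_by m.toNat
decreasing_by exact pv_shr_one_toNat_lt m h

lemma bitsRevB_pos (m : Int) (h : 0 < m) :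
    bitsRevB m = PySem.Int.band m 1 :: bitsRevB (m >>> (1 : Nat)) := by
  rw [bitsRevB, dif_pos h]

lemma bitsRevB_of_nonpos (m : Int) (h : ¬ 0 < m) : bitsRevB m = [] := by
  rw [bitsRevB, dif_neg h]

lemma shr_one_eq_fdiv (m : Int) : m >>> (1 : Nat) = PySem.Int.floordiv m 2 := by
  rw [PySem.Int.floordiv_eq_ediv_of_pos (by norm_num), Int.shiftRight_eq_div_pow]; norm_num

-- the character Python writes for the bit d of the exponent (d is 0 or 1)
def chB (d : Int) : Char := if d = 0 then '0' else '1'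

lemma bitsRevB_natCast (m : Nat) (h : 0 < m) :
    bitsRevB (m : Int) = ((m % 2 : Nat) : Int) :: bitsRevB ((m / 2 : Nat) : Int) := by
  rw [bitsRevB]
  have h0 : (0:Int) < (m:Int) := by exact_mod_cast h
  rw [dif_pos h0]
  have hb : PySem.Int.band (m : Int) 1 = ((m % 2 : Nat) : Int) := by
    have := PySem.Int.band_natCast m 1
    simpa [Nat.and_one_is_mod] using this
  have hs : ((m : Int) >>> (1:Nat)) = ((m / 2 : Nat) : Int) := by
    have : ((m : Int) >>> (1:Nat)) = ((m >>> 1 : Nat) : Int) := rfl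
    rw [this, Nat.shiftRight_one]
  rw [hb, hs]

lemma toDigitsCore_eq_bits (f : Nat) : ∀ (m : Nat) (ds : List Char), 0 < m → m < f →
    Nat.toDigitsCore 2 f m ds = (List.map chB (bitsRevB (m : Int))).reverse ++ ds := by
  induction f with
  | zero => intro m ds hm hf; omega
  | succ f ih =>
    intro m ds hm hf
    rw [Nat.toDigitsCore]
    rw [bitsRevB_natCast m hm]
    have hch : chB ((m % 2 : Nat) : Int) = Nat.digitChar (m % 2) := by
      rcases Nat.mod_two_eq_zero_or_one m with h | h <;> rw [h] <;> decide
    by_cases h2 : m / 2 = 0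
    · simp only [h2, if_pos]
      have : m = 1 := by omega
      subst this
      simp [chB, bitsRevB]
      decide
    · simp only [h2, ite_false]
      rw [ih (m / 2) _ (by omega) (by omega)]
      simp only [List.map_cons, List.reverse_cons, List.append_assoc, List.singleton_append]
      rw [hch]

lemma toDigits_eq_bits (k : Nat) (h : 0 < k) :
    Nat.toDigits 2 k = List.map chB ((bitsRevB (k : Int)).reverse) := by
  rw [Nat.toDigits, toDigitsCore_eq_bits (k+1) k [] h (by omega)]
  simp [List.map_reverse]

lemma toBinChars_pos (m : Int) (h : 0 < m) :
    PySem.Int.toBinChars m = List.map chB ((bitsRevB m).reverse) := by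
  unfold PySem.Int.toBinChars
  rw [if_neg (by omega)]
  rw [toDigits_eq_bits m.toNat (by omega), Int.toNat_of_nonneg h.le]

-- |bitsRevB m| is Python's m.bit_length() for positive m
lemma len_bitsRevB_aux : ∀ (k : Nat) (m : Int), 0 < m → m.toNat ≤ k →
    (bitsRevB m).length = PySem.Int.bitLength m := by
  intro k
  induction k with
  | zero => intro m h hk; omega
  | succ k ih =>
    intro m h hk
    have hfd : PySem.Int.floordiv m 2 = m / 2 :=
      PySem.Int.floordiv_eq_ediv_of_pos (show (0:Int) < 2 by norm_num)
    rw [bitsRevB_pos m h, PySem.Int.bitLength_of_pos h, List.length_cons, shr_one_eq_fdiv, hfd]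
    by_cases h2 : 0 < m / 2
    · rw [ih (m / 2) h2 (by omega)]
    · have hz : m / 2 = 0 := by omega
      rw [hz, bitsRevB_of_nonpos 0 (by norm_num)]
      simp [PySem.Int.bitLength_zero]

lemma len_bitsRevB (m : Int) (h : 0 < m) :
    (bitsRevB m).length = PySem.Int.bitLength m :=
  len_bitsRevB_aux m.toNat m h le_rfl

-- peeling k low bits off the bit stream = shifting the number right by k
lemma bits_decomp : ∀ (k : Nat) (e : Int), 0 < e → k + 1 ≤ (bitsRevB e).length →
    ∃ s : List Int, s.length = k ∧ bitsRevB e = s ++ bitsRevB (e >>> k) ∧ 0 < e >>> k := by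
  intro k
  induction k with
  | zero =>
    intro e he _
    exact ⟨[], rfl, by simp, by simpa using he⟩
  | succ k ih =>
    intro e he h
    obtain ⟨s, hs, hd, hq⟩ := ih e he (by omega)
    have hlen : (bitsRevB (e >>> k)).length = (bitsRevB e).length - k := by
      rw [hd]; simp [hs]
    have hcons := bitsRevB_pos _ hq
    have hq2 : 0 < (e >>> k) >>> (1 : Nat) := by
      by_contra hc
      rw [bitsRevB_of_nonpos _ hc] at hcons
      rw [hcons] at hlen
      simp at hlen
      omega
    have hsh : (e >>> k) >>> (1 : Nat) = e >>> (k + 1) := (Int.shiftRight_add e k 1).symm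
    refine ⟨s ++ [PySem.Int.band (e >>> k) 1], by simp [hs], ?_, by rwa [hsh] at hq2⟩
    rw [hd, hcons, hsh, List.append_assoc, List.singleton_append]

-- A's ladder step written as a fold function
def stepL (rmod n n_ l : Int) (st : Int × Int) (d : Int) : Int × Int :=
  if d = 0 then (REDC rmod n n_ (st.1 * st.1) l, REDC rmod n n_ (st.1 * st.2) l)
  else (REDC rmod n n_ (st.1 * st.2) l, REDC rmod n n_ (st.2 * st.2) l)

lemma reduceB_eq (t n n_ R L : Int) : reduceB t n n_ R L = REDC R n n_ t L := rfl

lemma probe_eq (t n n_ R L : Int) :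
    (if montyB t n n_ R L ≥ n then (1 : Int) else 0) = CheckREDC R n n_ t L := rfl

lemma ladder_eq_fold (n n_ rmask l : Int) : ∀ (k : Nat) (p : Int), 0 < p → p.toNat ≤ k →
    ∀ x1 x2, ladderB n n_ rmask l p x1 x2 =
      List.foldl (stepL rmask n n_ l) (x1, x2) ((bitsRevB p).reverse.tail) := by
  intro k
  induction k with
  | zero => intro p hp hk; omega
  | succ k ih =>
    intro p hp hk x1 x2
    rw [ladderB]
    by_cases h1 : p ≤ 1
    · have hp1 : p = 1 := by omega
      subst hp1
      rw [dif_pos (by norm_num)]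
      have h1 : bitsRevB 1 = [PySem.Int.band 1 1] := by
        rw [bitsRevB_pos 1 one_pos, show ((1:Int) >>> (1:Nat)) = 0 by decide,
          bitsRevB_of_nonpos 0 (by norm_num)]
      rw [h1]
      rfl
    · rw [dif_neg h1]
      have hp2 : 0 < p >>> (1 : Nat) := by
        rw [shr_one_eq_fdiv, PySem.Int.floordiv_eq_ediv_of_pos (by norm_num)]
        omega
      have hkk : (p >>> (1 : Nat)).toNat ≤ k := by
        have := pv_shr_one_toNat_lt p (by omega)
        omega
      have hne : (bitsRevB (p >>> (1 : Nat))).reverse ≠ [] := by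
        rw [bitsRevB_pos _ hp2]
        simp
      rw [bitsRevB_pos p (by omega), List.reverse_cons,
        List.tail_append_of_ne_nil hne, List.foldl_append, ← ih (p >>> (1 : Nat)) hp2 hkk x1 x2]
      have hb := PySem.Int.band_one p
      have hm0 := PySem.Int.mod_nonneg p (show (0:Int) < 2 by norm_num)
      have hm1 := PySem.Int.mod_lt p (show (0:Int) < 2 by norm_num)
      by_cases hz : PySem.Int.band p 1 = 0
      · simp only [hz, List.foldl_cons, List.foldl_nil, stepL, reduceB_eq]
        norm_num
      · have ho : PySem.Int.band p 1 = 1 := by omega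
        simp only [ho, List.foldl_cons, List.foldl_nil, stepL, reduceB_eq]
        norm_num

lemma loopA_eq_fold (rmod n n_ l bit : Int) :
    ∀ (ds : List Int) (c x1 x2 : Int), 0 ≤ bit → bit ≤ c → c = (ds.length : Int) - 1 →
    loopA rmod n n_ l bit (List.map chB ds) c x1 x2 =
      (fun st => ((CheckREDC rmod n n_ (st.1 * st.2) l, CheckREDC rmod n n_ (st.2 * st.2) l),
                  (CheckREDC rmod n n_ (st.1 * st.2) l, CheckREDC rmod n n_ (st.1 * st.1) l)))
        ((ds.take (c - bit).toNat).foldl (stepL rmod n n_ l) (x1, x2)) := by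
  intro ds
  induction ds with
  | nil => intro c x1 x2 h0 hbc hc; simp at hc; omega
  | cons d rest ih =>
    intro c x1 x2 h0 hbc hc
    simp only [List.map_cons, loopA]
    by_cases hb : bit = c
    · rw [if_pos hb]
      have : (c - bit).toNat = 0 := by omega
      rw [this]
      simp [List.take_zero]
    · rw [if_neg hb]
      have hk : (c - bit).toNat = (c - 1 - bit).toNat + 1 := by omega
      rw [hk, List.take_succ_cons, List.foldl_cons]
      have hlen : c - 1 = (rest.length : Int) - 1 := by
        simp at hc; omega
      by_cases hd : d = 0
      · have : chB d = '0' := by simp [chB, hd]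
        rw [this, if_pos rfl, ih (c-1) _ _ h0 (by omega) hlen]
        simp [stepL, hd]
      · have hch : chB d = '1' := by simp [chB, hd]
        rw [hch, if_neg (by decide), ih (c-1) _ _ h0 (by omega) hlen]
        simp [stepL, hd]

-- the prefix of ladder steps A performs before the probed bit is exactly the bit stream of e >> k
lemma take_prefix (e : Int) (k : Nat) (he : 0 < e) (hk : k + 1 ≤ (bitsRevB e).length) :
    List.take ((bitsRevB e).length - 1 - k) ((bitsRevB e).reverse.tail)
      = (bitsRevB (e >>> k)).reverse.tail ∧ 0 < e >>> k := by
  obtain ⟨s, hs, hd, hq⟩ := bits_decomp k e he hk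
  refine ⟨?_, hq⟩
  have hne : (bitsRevB (e >>> k)).reverse ≠ [] := by
    rw [bitsRevB_pos _ hq]; simp
  conv_lhs => rw [hd]
  rw [List.reverse_append, List.tail_append_of_ne_nil hne]
  apply List.take_left'
  simp only [List.length_tail, List.length_reverse, List.length_append, hs]
  omega

-- ===== VERDICT =====
theorem CheckDivExp_spec : Claim_equal_CheckDivExp := by
  intro mes e n bit hdom hpre
  obtain ⟨hn, hodd, he, hb0, hbe⟩ := hpre
  unfold Spec_CheckDivExp
  have hLn : PySem.Int.bitLength n = (PySem.Int.toBinChars n).length := by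
    rw [toBinChars_pos n (by omega)]
    simp only [List.length_map, List.length_reverse]
    exact (len_bitsRevB n (by omega)).symm
  have hLe : (PySem.Int.toBinChars e).length = PySem.Int.bitLength e := by
    rw [toBinChars_pos e (by omega)]
    simp only [List.length_map, List.length_reverse]
    exact len_bitsRevB e (by omega)
  simp only [CheckDivExp, CheckDivExp_alt, findR, hLn, Int.toNat_natCast, Int.shiftLeft_eq,
    one_mul, reduceB_eq, probe_eq]
  rw [PySem.List.len_eq, hLe] at hbe
  rw [if_neg (show ¬ bit > PySem.List.len (PySem.Int.toBinChars e) - 2 by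
        rw [PySem.List.len_eq, hLe]; omega),
      if_neg (show ¬ bit > (PySem.Int.bitLength e : Int) - 2 by omega)]
  rw [toBinChars_pos e (by omega)]
  have hLe2 : (bitsRevB e).length = PySem.Int.bitLength e := len_bitsRevB e (by omega)
  -- A's sliced character list is the mapped tail of the bit stream
  rw [PySem.List.slice_from_one, PySem.List.len_eq, ← List.map_tail]
  have hlentail : ((List.map chB (bitsRevB e).reverse).length : Int) - 2
      = (((bitsRevB e).reverse.tail.length : Int)) - 1 := by
    simp [List.length_tail]
    omega
  rw [hlentail]
  rw [loopA_eq_fold _ _ _ _ bit (bitsRevB e).reverse.tail _ _ _ hb0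
    (by simp only [List.length_tail, List.length_reverse]; omega) rfl]
  -- B's ladder is the same fold over the bit stream of e >> (bit+1)
  have hk1 : (bit + 1).toNat + 1 ≤ (bitsRevB e).length := by omega
  obtain ⟨htake, hqpos⟩ := take_prefix e (bit + 1).toNat (by omega) hk1
  rw [ladder_eq_fold _ _ _ _ (e >>> (bit + 1).toNat).toNat _ hqpos le_rfl]
  have harg : ((((bitsRevB e).reverse.tail.length : Int)) - 1 - bit).toNat
      = (bitsRevB e).length - 1 - (bit + 1).toNat := by
    simp only [List.length_tail, List.length_reverse]
    omega
  rw [harg, htake]
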